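-- pv_equiv track=rewrite | github.com/novac42/chrome-update-digest | src/mcp_tools/enhanced_webplatform_digest.py | _merge_webgpu_content
-- ===== SOURCE A (Python) =====
-- def _merge_webgpu_content(chrome_content: str, webgpu_content: str, version: str) -> str:
--     """
--     Merge WebGPU content with Chrome release notes.
--
--     Args:
--         chrome_content: Chrome release notes content
--         webgpu_content: WebGPU specific content
--         version: Chrome version
--
--     Returns:
--         Merged content
--     """
--     # Check if Chrome already has WebGPU section
--     if '## WebGPU' in chrome_content:
--         # Replace existing WebGPU section with detailed one
--         lines = chrome_content.split('\n')
--         new_lines = []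
--         skip_section = False
--
--         for line in lines:
--             if line.startswith('## WebGPU'):
--                 skip_section = True
--                 # Insert the WebGPU content here
--                 new_lines.append('## WebGPU')
--                 new_lines.append('')
--                 # Add WebGPU content without the title
--                 webgpu_lines = webgpu_content.split('\n')
--                 in_content = False
--                 for wline in webgpu_lines:
--                     if in_content or (wline and not wline.startswith('#')):
--                         in_content = True
--                         new_lines.append(wline)
--                 continue
--             elif skip_section and line.startswith('##'):
--                 skip_section = False
--
--             if not skip_section:
--                 new_lines.append(line)
--
--         return '\n'.join(new_lines)
--     else:
--         # Append WebGPU section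
--         return chrome_content + '\n\n## WebGPU\n\n' + webgpu_content
-- ===== SOURCE B (Python) =====
-- def _merge_webgpu_content(chrome_content: str, webgpu_content: str, version: str) -> str:
--     """Block-based re-implementation: partition the notes into '##'-headed blocks
--     and rebuild, replacing every block headed by '## WebGPU'."""
--     if '## WebGPU' not in chrome_content:
--         return chrome_content + '\n\n## WebGPU\n\n' + webgpu_content
--
--     # webgpu payload: drop leading blank or '#'-prefixed lines, keep the rest
--     wlines = webgpu_content.split('\n')
--     i = 0
--     while i < len(wlines) and (not wlines[i] or wlines[i].startswith('#')):
--         i += 1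
--     payload = wlines[i:]
--
--     # partition chrome_content into blocks, each starting at a '##' line
--     blocks = []
--     cur = []
--     for line in chrome_content.split('\n'):
--         if line.startswith('##'):
--             blocks.append(cur)
--             cur = [line]
--         else:
--             cur.append(line)
--     blocks.append(cur)
--
--     out = []
--     for b in blocks:
--         if b and b[0].startswith('## WebGPU'):
--             out.append('## WebGPU')
--             out.append('')
--             out.extend(payload)
--         else:
--             out.extend(b)
--     return '\n'.join(out)
-- ===== Notes on version B (the rewrite author's own statement) =====
-- stated objective: alternative
-- what changed: Replaces A's line-by-line skip_section state machine (with an inner flagged loop re-run at each header) by a partition of the notes into '##'-headed blocks, a once-computed stripped WebGPU payload, and a per-block emit that substitutes every '## WebGPU'-headed block.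
import Mathlib
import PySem

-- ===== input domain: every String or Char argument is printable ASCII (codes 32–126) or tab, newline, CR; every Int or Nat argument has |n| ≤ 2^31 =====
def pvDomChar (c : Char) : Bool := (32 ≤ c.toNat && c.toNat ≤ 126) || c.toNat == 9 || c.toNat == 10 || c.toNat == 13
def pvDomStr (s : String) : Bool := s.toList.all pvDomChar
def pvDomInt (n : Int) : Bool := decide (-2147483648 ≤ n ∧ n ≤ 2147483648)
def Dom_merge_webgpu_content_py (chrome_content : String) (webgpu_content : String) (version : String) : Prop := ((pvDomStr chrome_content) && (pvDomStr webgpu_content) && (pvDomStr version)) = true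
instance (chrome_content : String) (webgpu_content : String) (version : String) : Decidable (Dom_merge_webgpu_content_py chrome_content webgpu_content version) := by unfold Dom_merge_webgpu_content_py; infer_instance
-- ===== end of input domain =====

-- B rebuilds the notes from '##'-headed blocks (partition + per-block emit) instead of A's
-- line-by-line skip-flag state machine; objective: alternative decomposition, same cost.

-- s.split('\n') (the separator is non-empty, so Str.split? never returns none)
def pvSplitNL (s : String) : List String := (PySem.Str.split? s "\n").getD []

-- ===== PORT A =====
-- the inner for-loop over webgpu_lines, carrying in_content
def pvAInner : List String → Bool → List String
  | [], _ => []
  | w :: ws, inc =>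
    if inc || (!(w == "") && !(PySem.Str.startswith w "#")) then w :: pvAInner ws true
    else pvAInner ws inc

-- the main for-loop over lines, carrying skip_section
def pvALoop (webgpu_content : String) : List String → Bool → List String
  | [], _ => []
  | line :: rest, skip =>
    if PySem.Str.startswith line "## WebGPU" then
      "## WebGPU" :: "" :: (pvAInner (pvSplitNL webgpu_content) false ++ pvALoop webgpu_content rest true)
    else
      let skip' := if skip && PySem.Str.startswith line "##" then false else skip
      if skip' then pvALoop webgpu_content rest skip'
      else line :: pvALoop webgpu_content rest skip'

def merge_webgpu_content_py (chrome_content : String) (webgpu_content : String) (version : String) : String :=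
  if PySem.Str.isIn "## WebGPU" chrome_content then
    PySem.Str.join "\n" (pvALoop webgpu_content (pvSplitNL chrome_content) false)
  else
    chrome_content ++ "\n\n## WebGPU\n\n" ++ webgpu_content

-- ===== PORT B =====
-- drop the leading blank or '#'-prefixed lines of the webgpu content
def pvBDrop : List String → List String
  | [] => []
  | w :: ws => if w == "" || PySem.Str.startswith w "#" then pvBDrop ws else w :: ws

-- partition lines into blocks, a new block starting at every line that starts with '##'
def pvBBlocks : List String → List String → List (List String)
  | [], cur => [cur]
  | l :: ls, cur =>
    if PySem.Str.startswith l "##" then cur :: pvBBlocks ls [l]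
    else pvBBlocks ls (cur ++ [l])

-- emit a block: a '## WebGPU'-headed block becomes the replacement section
def pvBEmit (payload : List String) (b : List String) : List String :=
  match b with
  | l :: _ => if PySem.Str.startswith l "## WebGPU" then "## WebGPU" :: "" :: payload else b
  | [] => []

def merge_webgpu_content_py_alt (chrome_content : String) (webgpu_content : String) (version : String) : String :=
  if PySem.Str.isIn "## WebGPU" chrome_content then
    PySem.Str.join "\n"
      ((pvBBlocks (pvSplitNL chrome_content) []).flatMap
        (pvBEmit (pvBDrop (pvSplitNL webgpu_content))))
  else
    chrome_content ++ "\n\n## WebGPU\n\n" ++ webgpu_content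

-- ===== PRECONDITION & SPEC =====
def Spec_merge_webgpu_content_py (chrome_content : String) (webgpu_content : String) (version : String) (out : String) : Prop := out = merge_webgpu_content_py_alt chrome_content webgpu_content version
instance (chrome_content : String) (webgpu_content : String) (version : String) (out : String) : Decidable (Spec_merge_webgpu_content_py chrome_content webgpu_content version out) := by unfold Spec_merge_webgpu_content_py; infer_instance

-- ===== CLAIM (what is proved, stated in full; the proofs are below) =====
def Claim_equal_merge_webgpu_content_py : Prop := ∀ (chrome_content : String) (webgpu_content : String) (version : String), Dom_merge_webgpu_content_py chrome_content webgpu_content version → Spec_merge_webgpu_content_py chrome_content webgpu_content version (merge_webgpu_content_py chrome_content webgpu_content version)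

-- ===== LEMMAS AND PROOFS =====

-- once in_content is set, A's inner loop keeps everything
lemma pvAInner_true (ws : List String) : pvAInner ws true = ws := by
  induction ws with
  | nil => rfl
  | cons w ws ih => simp [pvAInner, ih]

-- A's inner loop (from in_content = False) is B's leading-line drop
lemma pvAInner_eq_pvBDrop (ws : List String) : pvAInner ws false = pvBDrop ws := by
  induction ws with
  | nil => rfl
  | cons w ws ih =>
    cases h1 : (w == "") <;> cases h2 : PySem.Str.startswith w "#" <;>
      simp [pvAInner, pvBDrop, h1, h2, ih, pvAInner_true, -PySem.Str.startswith_eq]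

-- a line starting with '## WebGPU' starts with '##'
lemma pvWebGPU_startswith (l : String) (h : PySem.Str.startswith l "## WebGPU" = true) :
    PySem.Str.startswith l "##" = true := by
  simp only [PySem.Str.startswith_eq] at h ⊢
  rw [PySem.Chars.startswith_iff] at h ⊢
  exact List.IsPrefix.trans (by decide) h

-- the head test B's emit performs on a block
def pvHeadGPU : List String → Bool
  | l :: _ => PySem.Str.startswith l "## WebGPU"
  | [] => false

lemma pvBEmit_of_false (payload : List String) (cur : List String) (h : pvHeadGPU cur = false) :
    pvBEmit payload cur = cur := by
  cases cur with
  | nil => rfl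
  | cons l ls => simp only [pvHeadGPU] at h; simp [pvBEmit, h, -PySem.Str.startswith_eq]

lemma pvBEmit_of_true (payload : List String) (cur : List String) (h : pvHeadGPU cur = true) :
    pvBEmit payload cur = "## WebGPU" :: "" :: payload := by
  cases cur with
  | nil => simp [pvHeadGPU] at h
  | cons l ls => simp only [pvHeadGPU] at h; simp [pvBEmit, h, -PySem.Str.startswith_eq]

-- main invariant: B's block emission equals the part of the current block A has already
-- emitted, followed by A's loop on the remaining lines with the matching skip flag
lemma pvMain (webgpu_content : String) (payload : List String)
    (hp : payload = pvAInner (pvSplitNL webgpu_content) false) :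
    ∀ (lines cur : List String) (skip : Bool), pvHeadGPU cur = skip →
      (pvBBlocks lines cur).flatMap (pvBEmit payload)
        = pvBEmit payload cur ++ pvALoop webgpu_content lines skip := by
  intro lines
  induction lines with
  | nil => intro cur skip h; simp [pvBBlocks, pvALoop]
  | cons l ls ih =>
    intro cur skip h
    cases h1 : PySem.Str.startswith l "## WebGPU" with
    | true =>
      -- a WebGPU header: B starts a replaced block, A inserts the section and starts skipping
      have h2 : PySem.Str.startswith l "##" = true := pvWebGPU_startswith l h1
      have hcur : pvHeadGPU [l] = true := by simpa [pvHeadGPU, -PySem.Str.startswith_eq] using h1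
      simp only [pvBBlocks]
      rw [if_pos h2, List.flatMap_cons, ih [l] true hcur, pvBEmit_of_true payload [l] hcur]
      have hA : pvALoop webgpu_content (l :: ls) skip
          = "## WebGPU" :: "" :: (payload ++ pvALoop webgpu_content ls true) := by
        simp [pvALoop, h1, hp, -PySem.Str.startswith_eq]
      rw [hA]; simp
    | false =>
      cases h2 : PySem.Str.startswith l "##" with
      | true =>
        -- another '##' header: B starts an ordinary block, A stops skipping and keeps the line
        have hcur : pvHeadGPU [l] = false := by simpa [pvHeadGPU, -PySem.Str.startswith_eq] using h1
        simp only [pvBBlocks]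
        rw [if_pos h2, List.flatMap_cons, ih [l] false hcur, pvBEmit_of_false payload [l] hcur]
        have hA : pvALoop webgpu_content (l :: ls) skip = l :: pvALoop webgpu_content ls false := by
          cases skip <;> simp [pvALoop, h1, h2, -PySem.Str.startswith_eq]
        rw [hA]; simp
      | false =>
        -- an ordinary line: it extends B's current block; A keeps or skips it by the flag
        simp only [pvBBlocks]
        rw [if_neg (by simp [h2, -PySem.Str.startswith_eq])]
        cases skip with
        | true =>
          have hne : cur ≠ [] := by intro hc; rw [hc] at h; simp [pvHeadGPU] at h
          have hh : pvHeadGPU (cur ++ [l]) = true := by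
            cases cur with
            | nil => exact absurd rfl hne
            | cons a as => simpa [pvHeadGPU] using h
          rw [ih (cur ++ [l]) true hh, pvBEmit_of_true payload _ hh, pvBEmit_of_true payload _ h]
          have hA : pvALoop webgpu_content (l :: ls) true = pvALoop webgpu_content ls true := by
            simp [pvALoop, h1, h2, -PySem.Str.startswith_eq]
          rw [hA]
        | false =>
          have hh : pvHeadGPU (cur ++ [l]) = false := by
            cases cur with
            | nil => simpa [pvHeadGPU, -PySem.Str.startswith_eq] using h1
            | cons a as => simpa [pvHeadGPU] using h
          rw [ih (cur ++ [l]) false hh, pvBEmit_of_false payload _ hh, pvBEmit_of_false payload _ h]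
          have hA : pvALoop webgpu_content (l :: ls) false = l :: pvALoop webgpu_content ls false := by
            simp [pvALoop, h1, h2, -PySem.Str.startswith_eq]
          rw [hA]; simp

-- ===== VERDICT (by name: the statement is the Claim_ definition above) =====
theorem merge_webgpu_content_py_spec : Claim_equal_merge_webgpu_content_py := by
  intro chrome_content webgpu_content version _
  unfold Spec_merge_webgpu_content_py merge_webgpu_content_py merge_webgpu_content_py_alt
  by_cases h : PySem.Str.isIn "## WebGPU" chrome_content = true
  · rw [if_pos h, if_pos h,
      pvMain webgpu_content (pvBDrop (pvSplitNL webgpu_content))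
        (pvAInner_eq_pvBDrop _).symm (pvSplitNL chrome_content) [] false rfl]
    rfl
  · rw [if_neg h, if_neg h]
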